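-- pv_equiv track=rewrite | github.com/Druneau/aoc2024 | day12/day12.py | get_fence_map
-- ===== SOURCE A (Python) =====
-- DIRECTIONS = [(-1, 0), (1, 0), (0, -1), (0, 1)]
--
-- def get_fence_map(region, id):
--     plots = set(region.keys())
--     fence_pieces = []
--
--     for row, col in plots:
--         for dr, dc in DIRECTIONS:
--             neighbor = (row + dr, col + dc)
--             if neighbor not in plots:
--                 fence_pieces.append(neighbor)
--
--     # build a fence map!
--     max_col = max(piece[1] for piece in fence_pieces)
--     max_row = max(piece[0] for piece in fence_pieces)
--     min_col = min(piece[1] for piece in fence_pieces)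
--     min_row = min(piece[0] for piece in fence_pieces)
--     fence_map = []
--
--     for row in range(min_row, max_row + 1):
--         map_row = []
--         for col in range(min_col, max_col + 1):
--             current_plot = (row, col)
--             if current_plot in fence_pieces:
--                 map_row.append("*")
--             elif current_plot in plots:
--                 map_row.append(id)
--             else:
--                 map_row.append(".")
--         fence_map.append(map_row)
--     # print_array(fence_map)
--     return fence_map
-- ===== SOURCE B (Python) =====
-- DIRECTIONS = [(-1, 0), (1, 0), (0, -1), (0, 1)]
--
-- def get_fence_map(region, id):
--     plots = set(region.keys())
--     # bounding box: one ring of fence cells around the plots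
--     min_row = min(r for r, _ in plots) - 1
--     max_row = max(r for r, _ in plots) + 1
--     min_col = min(c for _, c in plots) - 1
--     max_col = max(c for _, c in plots) + 1
--     grid = [["."] * (max_col - min_col + 1) for _ in range(max_row - min_row + 1)]
--     for r, c in plots:
--         grid[r - min_row][c - min_col] = id
--     for r, c in plots:
--         for dr, dc in DIRECTIONS:
--             nr, nc = r + dr, c + dc
--             if (nr, nc) not in plots:
--                 grid[nr - min_row][nc - min_col] = "*"
--     return grid
-- ===== Notes on version B (the rewrite author's own statement) =====
-- stated objective: alternative
-- what changed: B derives the bounding box directly from the plot coordinates (plot box grown by 1) and scatter-writes the plot ids and fence marks into a pre-allocated grid of '.', instead of building a fence_pieces list and classifying every cell of the box by membership scans of that list.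
import Mathlib
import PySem

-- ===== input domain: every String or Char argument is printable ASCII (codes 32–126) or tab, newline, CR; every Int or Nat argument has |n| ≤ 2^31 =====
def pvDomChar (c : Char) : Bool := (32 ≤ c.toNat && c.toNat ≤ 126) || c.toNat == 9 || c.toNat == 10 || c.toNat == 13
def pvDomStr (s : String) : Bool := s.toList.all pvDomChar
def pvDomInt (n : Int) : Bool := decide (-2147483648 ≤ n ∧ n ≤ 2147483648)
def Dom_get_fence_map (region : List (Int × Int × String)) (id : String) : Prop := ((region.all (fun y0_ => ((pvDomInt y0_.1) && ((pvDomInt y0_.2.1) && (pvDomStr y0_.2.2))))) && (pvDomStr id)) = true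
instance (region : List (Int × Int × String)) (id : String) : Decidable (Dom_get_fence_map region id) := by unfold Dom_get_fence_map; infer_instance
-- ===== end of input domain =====

-- B replaces A's per-cell membership classification (a linear scan of the fence list for
-- every cell of the bounding box) by computing the bounds directly from the plot
-- coordinates (fence box = plot box grown by 1) and scatter-writing the marks into a
-- pre-allocated grid of "." — a different decomposition of the same computation.
-- Equivalence is about the RETURN value; neither function mutates its arguments.

-- ===== PORT A =====
def pvDirections : List (Int × Int) := [(-1, 0), (1, 0), (0, -1), (0, 1)]

-- plots = set(region.keys())  (shared by both sources verbatim)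
def pvPlots (region : List (Int × Int × String)) : PySem.Set (Int × Int) :=
  PySem.Set.ofList (region.map (fun p => (p.1, p.2.1)))

def pvFencePieces (plots : List (Int × Int)) : List (Int × Int) :=
  plots.foldl (fun acc rc =>
    pvDirections.foldl (fun acc d =>
      if (rc.1 + d.1, rc.2 + d.2) ∈ plots then acc
      else acc ++ [(rc.1 + d.1, rc.2 + d.2)]) acc) []

def get_fence_map (region : List (Int × Int × String)) (id : String) : List (List String) :=
  let plots := pvPlots region
  let fence_pieces := pvFencePieces plots
  match fence_pieces with
  | [] => []  -- Python: max() of an empty sequence raises ValueError; excluded by Pre_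
  | f :: rest =>
      let max_col := rest.foldl (fun m q => max m q.2) f.2
      let max_row := rest.foldl (fun m q => max m q.1) f.1
      let min_col := rest.foldl (fun m q => min m q.2) f.2
      let min_row := rest.foldl (fun m q => min m q.1) f.1
      (PySem.List.pyRange min_row (max_row + 1) 1).map (fun row =>
        (PySem.List.pyRange min_col (max_col + 1) 1).map (fun col =>
          if (row, col) ∈ fence_pieces then "*"
          else if (row, col) ∈ plots then id
          else "."))

-- ===== PORT B =====
-- grid[i][j] = v;  on every input admitted by Pre_ the write indices are proved in
-- range below, where this equals Python's in-place list assignment exactly.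
def pvWrite (g : List (List String)) (i j : Int) (v : String) : List (List String) :=
  PySem.List.pySetD g i (PySem.List.pySetD (PySem.List.pyGetD g i []) j v)

def get_fence_map_alt (region : List (Int × Int × String)) (id : String) : List (List String) :=
  let plots := pvPlots region
  match plots with
  | [] => []  -- Python: min() of an empty sequence raises ValueError; excluded by Pre_
  | p :: rest =>
      let min_row := rest.foldl (fun m q => min m q.1) p.1 - 1
      let max_row := rest.foldl (fun m q => max m q.1) p.1 + 1
      let min_col := rest.foldl (fun m q => min m q.2) p.2 - 1
      let max_col := rest.foldl (fun m q => max m q.2) p.2 + 1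
      let grid0 := (PySem.List.pyRange 0 (max_row - min_row + 1) 1).map
        (fun _ => List.replicate (max_col - min_col + 1).toNat ".")
      let grid1 := plots.foldl
        (fun g rc => pvWrite g (rc.1 - min_row) (rc.2 - min_col) id) grid0
      plots.foldl (fun g rc =>
        pvDirections.foldl (fun g d =>
          if (rc.1 + d.1, rc.2 + d.2) ∈ plots then g
          else pvWrite g (rc.1 + d.1 - min_row) (rc.2 + d.2 - min_col) "*") g) grid1

-- ===== PRECONDITION & SPEC =====
-- Pre_ excludes exactly the empty region, on which both Pythons raise ValueError
-- (max()/min() of an empty sequence).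
def Pre_get_fence_map (region : List (Int × Int × String)) (id : String) : Prop :=
  region ≠ []
instance (region : List (Int × Int × String)) (id : String) : Decidable (Pre_get_fence_map region id) := by unfold Pre_get_fence_map; infer_instance

def pvWitness_get_fence_map : (List (Int × Int × String)) × String := ([(0, 0, "A"), (0, 1, "A")], "A")

def Spec_get_fence_map (region : List (Int × Int × String)) (id : String) (out : List (List String)) : Prop := out = get_fence_map_alt region id
instance (region : List (Int × Int × String)) (id : String) (out : List (List String)) : Decidable (Spec_get_fence_map region id out) := by unfold Spec_get_fence_map; infer_instance

-- ===== CLAIM (what is proved, stated in full; the proofs are below) =====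
def Claim_equal_get_fence_map : Prop := ∀ (region : List (Int × Int × String)) (id : String), Dom_get_fence_map region id → Pre_get_fence_map region id → Spec_get_fence_map region id (get_fence_map region id)

-- ===== LEMMAS AND PROOFS =====

-- the cell of a grid, and rectangular shape
def pvCell (g : List (List String)) (r c : Nat) : String := (g.getD r []).getD c ""
def pvRect (g : List (List String)) (h w : Nat) : Prop :=
  g.length = h ∧ ∀ row ∈ g, row.length = w

-- the fence list in flatMap normal form
def pvFenceFlat (plots : List (Int × Int)) : List (Int × Int) :=
  plots.flatMap (fun rc =>
    pvDirections.filterMap (fun d =>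
      if (rc.1 + d.1, rc.2 + d.2) ∈ plots then none
      else some (rc.1 + d.1, rc.2 + d.2)))

theorem pvInner_append (plots : List (Int × Int)) (rc : Int × Int) :
    ∀ (ds : List (Int × Int)) (acc : List (Int × Int)),
      ds.foldl (fun acc d =>
        if (rc.1 + d.1, rc.2 + d.2) ∈ plots then acc
        else acc ++ [(rc.1 + d.1, rc.2 + d.2)]) acc
      = acc ++ ds.filterMap (fun d =>
          if (rc.1 + d.1, rc.2 + d.2) ∈ plots then none
          else some (rc.1 + d.1, rc.2 + d.2)) := by
  intro ds
  induction ds with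
  | nil => simp
  | cons d ds ih =>
    intro acc
    simp only [List.foldl_cons, List.filterMap_cons]
    by_cases h : (rc.1 + d.1, rc.2 + d.2) ∈ plots
    · simp [h, ih]
    · simp [h, ih]

theorem pvFencePieces_eq_flat (plots : List (Int × Int)) :
    pvFencePieces plots = pvFenceFlat plots := by
  have aux : ∀ (ps : List (Int × Int)) (acc : List (Int × Int)),
      ps.foldl (fun acc rc =>
        pvDirections.foldl (fun acc d =>
          if (rc.1 + d.1, rc.2 + d.2) ∈ plots then acc
          else acc ++ [(rc.1 + d.1, rc.2 + d.2)]) acc) acc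
      = acc ++ ps.flatMap (fun rc =>
          pvDirections.filterMap (fun d =>
            if (rc.1 + d.1, rc.2 + d.2) ∈ plots then none
            else some (rc.1 + d.1, rc.2 + d.2))) := by
    intro ps
    induction ps with
    | nil => simp
    | cons rc ps ih =>
      intro acc
      simp only [List.foldl_cons, List.flatMap_cons, pvInner_append plots rc, ih,
        List.append_assoc]
  simpa [pvFencePieces, pvFenceFlat] using aux plots []

theorem pvMem_fence (plots : List (Int × Int)) (q : Int × Int) :
    q ∈ pvFencePieces plots ↔
      ∃ p ∈ plots, ∃ d ∈ pvDirections, q = (p.1 + d.1, p.2 + d.2) ∧ q ∉ plots := by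
  rw [pvFencePieces_eq_flat]
  simp only [pvFenceFlat, List.mem_flatMap, List.mem_filterMap]
  constructor
  · rintro ⟨p, hp, d, hd, hsome⟩
    by_cases h : (p.1 + d.1, p.2 + d.2) ∈ plots
    · simp [h] at hsome
    · simp [h] at hsome
      exact ⟨p, hp, d, hd, hsome.symm, hsome ▸ h⟩
  · rintro ⟨p, hp, d, hd, rfl, hq⟩
    exact ⟨p, hp, d, hd, by simp [hq]⟩

theorem pvInnerWrite (plots : List (Int × Int)) (rc : Int × Int) (a b : Int) (v : String) :
    ∀ (ds : List (Int × Int)) (g : List (List String)),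
      ds.foldl (fun g d =>
        if (rc.1 + d.1, rc.2 + d.2) ∈ plots then g
        else pvWrite g (rc.1 + d.1 - a) (rc.2 + d.2 - b) v) g
      = (ds.filterMap (fun d =>
          if (rc.1 + d.1, rc.2 + d.2) ∈ plots then none
          else some (rc.1 + d.1, rc.2 + d.2))).foldl
            (fun g q => pvWrite g (q.1 - a) (q.2 - b) v) g := by
  intro ds
  induction ds with
  | nil => simp
  | cons d ds ih =>
    intro g
    simp only [List.foldl_cons, List.filterMap_cons]
    by_cases h : (rc.1 + d.1, rc.2 + d.2) ∈ plots
    · simp [h, ih]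
    · simp [h, ih]

theorem pvNested_eq_fenceFold (plots : List (Int × Int)) (a b : Int)
    (v : String) (G : List (List String)) :
    plots.foldl (fun g rc =>
        pvDirections.foldl (fun g d =>
          if (rc.1 + d.1, rc.2 + d.2) ∈ plots then g
          else pvWrite g (rc.1 + d.1 - a) (rc.2 + d.2 - b) v) g) G
      = (pvFencePieces plots).foldl (fun g q => pvWrite g (q.1 - a) (q.2 - b) v) G := by
  rw [pvFencePieces_eq_flat, pvFenceFlat, List.foldl_flatMap]
  have : (fun (g : List (List String)) (rc : Int × Int) =>
      pvDirections.foldl (fun g d =>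
        if (rc.1 + d.1, rc.2 + d.2) ∈ plots then g
        else pvWrite g (rc.1 + d.1 - a) (rc.2 + d.2 - b) v) g)
    = (fun g rc => (pvDirections.filterMap (fun d =>
          if (rc.1 + d.1, rc.2 + d.2) ∈ plots then none
          else some (rc.1 + d.1, rc.2 + d.2))).foldl
            (fun g q => pvWrite g (q.1 - a) (q.2 - b) v) g) := by
    funext g rc
    exact pvInnerWrite plots rc a b v pvDirections g
  rw [this]

theorem pvWrite_cell (g : List (List String)) (h w : Nat) (i j : Int) (v : String)
    (hg : pvRect g h w) (hi : 0 ≤ i ∧ i < (h : Int)) (hj : 0 ≤ j ∧ j < (w : Int)) :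
    pvRect (pvWrite g i j v) h w ∧
      ∀ r c : Nat, pvCell (pvWrite g i j v) r c =
        if i = (r : Int) ∧ j = (c : Int) then v else pvCell g r c := by
  obtain ⟨hlen, hrow⟩ := hg
  have hilt : i.toNat < g.length := by omega
  have hrowmem : g[i.toNat] ∈ g := List.getElem_mem hilt
  have hwrow : (g[i.toNat]).length = w := hrow _ hrowmem
  have hjlt : j.toNat < (g[i.toNat]).length := by omega
  have hget : PySem.List.pyGetD g i [] = g[i.toNat] :=
    PySem.List.pyGetD_eq_getElem g [] hi.1 (by omega)
  have hw1 : pvWrite g i j v = g.set i.toNat ((g[i.toNat]).set j.toNat v) := by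
    rw [pvWrite, hget, PySem.List.pySetD_of_nonneg _ _ hj.1,
      PySem.List.pySetD_of_nonneg _ _ hi.1]
  constructor
  · constructor
    · rw [hw1]; simpa using hlen
    · intro row hrmem
      rw [hw1] at hrmem
      rcases List.mem_or_eq_of_mem_set hrmem with hm | rfl
      · exact hrow _ hm
      · simpa using hwrow
  · intro r c
    rw [hw1]
    by_cases hir : i = (r : Int)
    · have hri : i.toNat = r := by omega
      subst hri
      by_cases hjc : j = (c : Int)
      · have hjn : j.toNat = c := by omega
        subst hjn
        rw [if_pos ⟨hir, hjc⟩]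
        simp [pvCell, List.getD_eq_getElem?_getD,
          List.getElem?_set_self hilt, List.getElem?_set_self hjlt]
      · have hjn : j.toNat ≠ c := by omega
        rw [if_neg (fun hh => hjc hh.2)]
        simp [pvCell, List.getD_eq_getElem?_getD,
          List.getElem?_set_self hilt, List.getElem?_set_ne hjn,
          List.getElem?_eq_getElem hilt]
    · have hin : i.toNat ≠ r := by omega
      rw [if_neg (fun hh => hir hh.1)]
      simp [pvCell, List.getD_eq_getElem?_getD, List.getElem?_set_ne hin]

theorem pvScatter {α : Type} (L : List α) (fi fj : α → Int) (v : String)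
    (g : List (List String)) (h w : Nat) (hg : pvRect g h w)
    (hb : ∀ x ∈ L, 0 ≤ fi x ∧ fi x < (h : Int) ∧ 0 ≤ fj x ∧ fj x < (w : Int)) :
    pvRect (L.foldl (fun g x => pvWrite g (fi x) (fj x) v) g) h w ∧
      ∀ r c : Nat, pvCell (L.foldl (fun g x => pvWrite g (fi x) (fj x) v) g) r c =
        if ∃ x ∈ L, fi x = (r : Int) ∧ fj x = (c : Int) then v else pvCell g r c := by
  induction L generalizing g with
  | nil => simpa using hg
  | cons x L ih =>
    have hbx := hb x (List.mem_cons_self ..)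
    have hw := pvWrite_cell g h w (fi x) (fj x) v hg ⟨hbx.1, hbx.2.1⟩ ⟨hbx.2.2.1, hbx.2.2.2⟩
    have := ih (pvWrite g (fi x) (fj x) v) hw.1
      (fun y hy => hb y (List.mem_cons_of_mem _ hy))
    simp only [List.foldl_cons]
    refine ⟨this.1, fun r c => ?_⟩
    rw [this.2 r c, hw.2 r c]
    by_cases h1 : ∃ y ∈ L, fi y = (r : Int) ∧ fj y = (c : Int)
    · rw [if_pos h1, if_pos ?_]
      obtain ⟨y, hy, hc⟩ := h1
      exact ⟨y, List.mem_cons_of_mem _ hy, hc⟩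
    · rw [if_neg h1]
      by_cases h2 : fi x = (r : Int) ∧ fj x = (c : Int)
      · rw [if_pos h2, if_pos ⟨x, List.mem_cons_self .., h2⟩]
      · rw [if_neg h2, if_neg ?_]
        rintro ⟨y, hy, hc⟩
        rcases List.mem_cons.1 hy with rfl | hy'
        · exact h2 hc
        · exact h1 ⟨y, hy', hc⟩

theorem pvFoldl_max_eq {α : Type} (f : α → Int) (x : α) (t : List α) (M : Int)
    (hub : ∀ y ∈ x :: t, f y ≤ M) (hmem : ∃ y ∈ x :: t, f y = M) :
    t.foldl (fun m q => max m (f q)) (f x) = M := by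
  have hmap : t.foldl (fun m q => max m (f q)) (f x) = (t.map f).foldl max (f x) := by
    rw [List.foldl_map]
  rw [hmap]
  have h1 := PySem.List.le_foldl_max (t.map f) (f x)
  have h2 := PySem.List.foldl_max_mem (t.map f) (f x)
  obtain ⟨y, hy, hyM⟩ := hmem
  apply le_antisymm
  · rcases h2 with h | h
    · rw [h]; exact hub x (List.mem_cons_self ..)
    · obtain ⟨z, hz, hez⟩ := List.mem_map.1 h
      rw [← hez]; exact hub z (List.mem_cons_of_mem _ hz)
  · rcases List.mem_cons.1 hy with rfl | hy'
    · rw [← hyM]; exact h1.1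
    · rw [← hyM]; exact h1.2 _ (List.mem_map_of_mem hy')

theorem pvFoldl_min_eq {α : Type} (f : α → Int) (x : α) (t : List α) (M : Int)
    (hlb : ∀ y ∈ x :: t, M ≤ f y) (hmem : ∃ y ∈ x :: t, f y = M) :
    t.foldl (fun m q => min m (f q)) (f x) = M := by
  have hmap : t.foldl (fun m q => min m (f q)) (f x) = (t.map f).foldl min (f x) := by
    rw [List.foldl_map]
  rw [hmap]
  have h1 := PySem.List.foldl_min_le (t.map f) (f x)
  have h2 := PySem.List.foldl_min_mem (t.map f) (f x)
  obtain ⟨y, hy, hyM⟩ := hmem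
  apply le_antisymm
  · rcases List.mem_cons.1 hy with rfl | hy'
    · rw [← hyM]; exact h1.1
    · rw [← hyM]; exact h1.2 _ (List.mem_map_of_mem hy')
  · rcases h2 with h | h
    · rw [h]; exact hlb x (List.mem_cons_self ..)
    · obtain ⟨z, hz, hez⟩ := List.mem_map.1 h
      rw [← hez]; exact hlb z (List.mem_cons_of_mem _ hz)


theorem pvBounds_min {α : Type} (f : α → Int) (p : α) (rest : List α) :
    (∀ x ∈ p :: rest, rest.foldl (fun m q => min m (f q)) (f p) ≤ f x) ∧
      (∃ x ∈ p :: rest, f x = rest.foldl (fun m q => min m (f q)) (f p)) := by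
  have e : rest.foldl (fun m q => min m (f q)) (f p) = (rest.map f).foldl min (f p) :=
    List.foldl_map.symm
  rw [e]
  have h1 := PySem.List.foldl_min_le (rest.map f) (f p)
  have h2 := PySem.List.foldl_min_mem (rest.map f) (f p)
  constructor
  · intro x hx
    rcases List.mem_cons.1 hx with rfl | hx'
    · exact h1.1
    · exact h1.2 _ (List.mem_map_of_mem hx')
  · rcases h2 with h | h
    · exact ⟨p, List.mem_cons_self .., h.symm⟩
    · obtain ⟨z, hz, hez⟩ := List.mem_map.1 h
      exact ⟨z, List.mem_cons_of_mem _ hz, hez⟩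

theorem pvBounds_max {α : Type} (f : α → Int) (p : α) (rest : List α) :
    (∀ x ∈ p :: rest, f x ≤ rest.foldl (fun m q => max m (f q)) (f p)) ∧
      (∃ x ∈ p :: rest, f x = rest.foldl (fun m q => max m (f q)) (f p)) := by
  have e : rest.foldl (fun m q => max m (f q)) (f p) = (rest.map f).foldl max (f p) :=
    List.foldl_map.symm
  rw [e]
  have h1 := PySem.List.le_foldl_max (rest.map f) (f p)
  have h2 := PySem.List.foldl_max_mem (rest.map f) (f p)
  constructor
  · intro x hx
    rcases List.mem_cons.1 hx with rfl | hx'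
    · exact h1.1
    · exact h1.2 _ (List.mem_map_of_mem hx')
  · rcases h2 with h | h
    · exact ⟨p, List.mem_cons_self .., h.symm⟩
    · obtain ⟨z, hz, hez⟩ := List.mem_map.1 h
      exact ⟨z, List.mem_cons_of_mem _ hz, hez⟩

set_option maxHeartbeats 2000000 in
theorem pvGrids_eq (P : List (Int × Int)) (mR MR mC MC : Int) (id : String)
    (hb : ∀ x ∈ P, mR ≤ x.1 ∧ x.1 ≤ MR ∧ mC ≤ x.2 ∧ x.2 ≤ MC)
    (hne : mR ≤ MR ∧ mC ≤ MC)
    (hFPb : ∀ q ∈ pvFencePieces P,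
      mR - 1 ≤ q.1 ∧ q.1 ≤ MR + 1 ∧ mC - 1 ≤ q.2 ∧ q.2 ≤ MC + 1) :
    (PySem.List.pyRange (mR - 1) (MR + 1 + 1) 1).map (fun row =>
      (PySem.List.pyRange (mC - 1) (MC + 1 + 1) 1).map (fun col =>
        if (row, col) ∈ pvFencePieces P then "*"
        else if (row, col) ∈ P then id
        else "."))
    = P.foldl (fun g rc =>
        pvDirections.foldl (fun g d =>
          if (rc.1 + d.1, rc.2 + d.2) ∈ P then g
          else pvWrite g (rc.1 + d.1 - (mR - 1)) (rc.2 + d.2 - (mC - 1)) "*") g)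
        (P.foldl (fun g rc => pvWrite g (rc.1 - (mR - 1)) (rc.2 - (mC - 1)) id)
          ((PySem.List.pyRange 0 (MR + 1 - (mR - 1) + 1) 1).map
            (fun _ => List.replicate (MC + 1 - (mC - 1) + 1).toNat "."))) := by
  set H := (MR + 1 - (mR - 1) + 1).toNat with hH
  set W := (MC + 1 - (mC - 1) + 1).toNat with hW
  have hHI : (H : Int) = MR - mR + 3 := by omega
  have hWI : (W : Int) = MC - mC + 3 := by omega
  set G0 := ((PySem.List.pyRange 0 (MR + 1 - (mR - 1) + 1) 1).map
    (fun _ => List.replicate W ".")) with hG0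
  have rect0 : pvRect G0 H W := by
    constructor
    · rw [hG0]
      simp only [List.length_map, PySem.List.length_pyRange_one]
      omega
    · intro row hrow
      rw [hG0] at hrow
      obtain ⟨_, _, rfl⟩ := List.mem_map.1 hrow
      simp
  have hbn1 : ∀ x ∈ P, 0 ≤ (fun rc => rc.1 - (mR - 1)) x ∧
      (fun rc => rc.1 - (mR - 1)) x < (H : Int) ∧
      0 ≤ (fun rc => rc.2 - (mC - 1)) x ∧ (fun rc => rc.2 - (mC - 1)) x < (W : Int) := by
    intro x hx
    have := hb x hx
    refine ⟨?_, ?_, ?_, ?_⟩ <;> dsimp only <;> omega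
  have hbn2 : ∀ q ∈ pvFencePieces P, 0 ≤ (fun q => q.1 - (mR - 1)) q ∧
      (fun q => q.1 - (mR - 1)) q < (H : Int) ∧
      0 ≤ (fun q => q.2 - (mC - 1)) q ∧ (fun q => q.2 - (mC - 1)) q < (W : Int) := by
    intro q hq
    have := hFPb q hq
    refine ⟨?_, ?_, ?_, ?_⟩ <;> dsimp only <;> omega
  have S1 := pvScatter P (fun rc => rc.1 - (mR - 1)) (fun rc => rc.2 - (mC - 1)) id
    G0 H W rect0 hbn1
  set G1 := P.foldl (fun g rc => pvWrite g (rc.1 - (mR - 1)) (rc.2 - (mC - 1)) id) G0 with hG1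
  rw [pvNested_eq_fenceFold]
  have S2 := pvScatter (pvFencePieces P) (fun q => q.1 - (mR - 1)) (fun q => q.2 - (mC - 1)) "*"
    G1 H W S1.1 hbn2
  set G2 := (pvFencePieces P).foldl
    (fun g q => pvWrite g (q.1 - (mR - 1)) (q.2 - (mC - 1)) "*") G1 with hG2
  apply List.ext_getElem
  · rw [S2.1.1]
    simp only [List.length_map, PySem.List.length_pyRange_one]
    omega
  intro i hi1 hi2
  have hiH : i < H := by rw [← S2.1.1]; exact hi2
  apply List.ext_getElem
  · rw [S2.1.2 _ (List.getElem_mem hi2)]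
    simp only [List.getElem_map, List.length_map, PySem.List.length_pyRange_one]
    omega
  intro j hj1 hj2
  have hjW : j < W := by
    rw [S2.1.2 _ (List.getElem_mem hi2)] at hj2
    exact hj2
  have hcell : ∀ (g : List (List String)) (i j : Nat) (hi : i < g.length)
      (hj : j < (g[i]'hi).length), (g[i]'hi)[j]'hj = pvCell g i j := by
    intro g i j hi hj
    rw [pvCell, List.getD_eq_getElem _ _ hi, List.getD_eq_getElem _ _ hj]
  rw [hcell _ i j hi2 hj2]
  rw [S2.2 i j, S1.2 i j]
  have h0 : pvCell G0 i j = "." := by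
    rw [pvCell, hG0]
    have hlen0 : i < ((PySem.List.pyRange 0 (MR + 1 - (mR - 1) + 1) 1).map
        (fun _ => List.replicate W ".")).length := by
      simp only [List.length_map, PySem.List.length_pyRange_one]; omega
    rw [List.getD_eq_getElem _ _ hlen0, List.getElem_map]
    exact List.getD_replicate _ hjW
  rw [h0]
  simp only [List.getElem_map, PySem.List.getElem_pyRange_one]
  have c1 : (∃ q ∈ pvFencePieces P, q.1 - (mR - 1) = (i : Int) ∧ q.2 - (mC - 1) = (j : Int))
      ↔ (mR - 1 + (i : Int), mC - 1 + (j : Int)) ∈ pvFencePieces P := by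
    constructor
    · rintro ⟨⟨q1, q2⟩, hq, h1, h2⟩
      dsimp only at h1 h2
      have e1 : mR - 1 + (i : Int) = q1 := by omega
      have e2 : mC - 1 + (j : Int) = q2 := by omega
      rw [e1, e2]; exact hq
    · intro hm
      exact ⟨_, hm, by dsimp only; omega, by dsimp only; omega⟩
  have c2 : (∃ x ∈ P, x.1 - (mR - 1) = (i : Int) ∧ x.2 - (mC - 1) = (j : Int))
      ↔ (mR - 1 + (i : Int), mC - 1 + (j : Int)) ∈ P := by
    constructor
    · rintro ⟨⟨q1, q2⟩, hq, h1, h2⟩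
      dsimp only at h1 h2
      have e1 : mR - 1 + (i : Int) = q1 := by omega
      have e2 : mC - 1 + (j : Int) = q2 := by omega
      rw [e1, e2]; exact hq
    · intro hm
      exact ⟨_, hm, by dsimp only; omega, by dsimp only; omega⟩
  simp only [c1, c2]

-- ===== VERDICT (by name: the statement is the Claim_ definition above) =====
theorem get_fence_map_spec : Claim_equal_get_fence_map := by
  intro region id _ hpre
  unfold Spec_get_fence_map
  have hPne : pvPlots region ≠ [] := by
    cases hr : region with
    | nil => exact absurd hr hpre
    | cons z zs =>
      intro h
      have hm : (z.1, z.2.1) ∈ pvPlots region := by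
        rw [pvPlots, PySem.Set.mem_ofList, hr]
        exact List.mem_map_of_mem (List.mem_cons_self ..)
      rw [hr, h] at hm
      exact absurd hm (by simp)
  obtain ⟨p, rest, hP⟩ := List.exists_cons_of_ne_nil hPne
  unfold get_fence_map get_fence_map_alt
  rw [hP]
  -- plot bounds and their attainment
  have hminR := pvBounds_min (fun q => q.1) p rest
  have hmaxR := pvBounds_max (fun q => q.1) p rest
  have hminC := pvBounds_min (fun q => q.2) p rest
  have hmaxC := pvBounds_max (fun q => q.2) p rest
  set mR := rest.foldl (fun m q => min m q.1) p.1 with hmRdef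
  set MR := rest.foldl (fun m q => max m q.1) p.1 with hMRdef
  set mC := rest.foldl (fun m q => min m q.2) p.2 with hmCdef
  set MC := rest.foldl (fun m q => max m q.2) p.2 with hMCdef
  have hpmem : p ∈ p :: rest := List.mem_cons_self ..
  have hPB : ∀ x ∈ p :: rest, mR ≤ x.1 ∧ x.1 ≤ MR ∧ mC ≤ x.2 ∧ x.2 ≤ MC :=
    fun x hx => ⟨hminR.1 x hx, hmaxR.1 x hx, hminC.1 x hx, hmaxC.1 x hx⟩
  have hne : mR ≤ MR ∧ mC ≤ MC :=
    ⟨le_trans (hminR.1 p hpmem) (hmaxR.1 p hpmem),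
     le_trans (hminC.1 p hpmem) (hmaxC.1 p hpmem)⟩
  obtain ⟨pa, hpa, hpaR⟩ := hminR.2
  obtain ⟨pb, hpb, hpbR⟩ := hmaxR.2
  obtain ⟨pc, hpc, hpcC⟩ := hminC.2
  obtain ⟨pd, hpd, hpdC⟩ := hmaxC.2
  have hFPb : ∀ q ∈ pvFencePieces (p :: rest),
      mR - 1 ≤ q.1 ∧ q.1 ≤ MR + 1 ∧ mC - 1 ≤ q.2 ∧ q.2 ≤ MC + 1 := by
    intro q hq
    rw [pvMem_fence] at hq
    obtain ⟨pp, hpp, d, hd, rfl, -⟩ := hq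
    have hx := hPB pp hpp
    fin_cases hd <;> simp <;> omega
  have hqt : (mR - 1, pa.2) ∈ pvFencePieces (p :: rest) := by
    rw [pvMem_fence]
    refine ⟨pa, hpa, (-1, 0), by simp [pvDirections], ?_, ?_⟩
    · rw [Prod.mk.injEq]; constructor <;> simp <;> omega
    · intro hmem
      have := (hPB _ hmem).1
      simp at this
  have hqb : (MR + 1, pb.2) ∈ pvFencePieces (p :: rest) := by
    rw [pvMem_fence]
    refine ⟨pb, hpb, (1, 0), by simp [pvDirections], ?_, ?_⟩
    · rw [Prod.mk.injEq]; constructor <;> simp <;> omega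
    · intro hmem
      have := (hPB _ hmem).2.1
      simp at this
  have hql : (pc.1, mC - 1) ∈ pvFencePieces (p :: rest) := by
    rw [pvMem_fence]
    refine ⟨pc, hpc, (0, -1), by simp [pvDirections], ?_, ?_⟩
    · rw [Prod.mk.injEq]; constructor <;> simp <;> omega
    · intro hmem
      have := (hPB _ hmem).2.2.1
      simp at this
  have hqr : (pd.1, MC + 1) ∈ pvFencePieces (p :: rest) := by
    rw [pvMem_fence]
    refine ⟨pd, hpd, (0, 1), by simp [pvDirections], ?_, ?_⟩
    · rw [Prod.mk.injEq]; constructor <;> simp <;> omega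
    · intro hmem
      have := (hPB _ hmem).2.2.2
      simp at this
  have hFPb0 := hFPb
  obtain ⟨f, frest, hFP⟩ := List.exists_cons_of_ne_nil (List.ne_nil_of_mem hqt)
  rw [hFP] at hFPb hqt hqb hql hqr
  have e1 : frest.foldl (fun m q => max m q.2) f.2 = MC + 1 :=
    pvFoldl_max_eq (fun q => q.2) f frest (MC + 1)
      (fun y hy => (hFPb y hy).2.2.2) ⟨(pd.1, MC + 1), hqr, rfl⟩
  have e2 : frest.foldl (fun m q => max m q.1) f.1 = MR + 1 :=
    pvFoldl_max_eq (fun q => q.1) f frest (MR + 1)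
      (fun y hy => (hFPb y hy).2.1) ⟨(MR + 1, pb.2), hqb, rfl⟩
  have e3 : frest.foldl (fun m q => min m q.2) f.2 = mC - 1 :=
    pvFoldl_min_eq (fun q => q.2) f frest (mC - 1)
      (fun y hy => (hFPb y hy).2.2.1) ⟨(pc.1, mC - 1), hql, rfl⟩
  have e4 : frest.foldl (fun m q => min m q.1) f.1 = mR - 1 :=
    pvFoldl_min_eq (fun q => q.1) f frest (mR - 1)
      (fun y hy => (hFPb y hy).1) ⟨(mR - 1, pa.2), hqt, rfl⟩
  simp only [hFP]
  rw [← hmRdef, ← hMRdef, ← hmCdef, ← hMCdef, e1, e2, e3, e4, ← hFP]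
  exact pvGrids_eq (p :: rest) mR MR mC MC id hPB hne hFPb0
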